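-- pv_equiv track=rewrite | github.com/mandel94/td_toolkit | reports/map_ga4_categories.py | map_ga4_categories
-- ===== SOURCE A (Python) =====
-- CATEGORIES = {
--     "News": {"latest-news", "focus-italia"},
--     # "Anticipazioni": {"anticipazioni"},
--     "Recensioni": {"review", "netflix-film", "sky-film", "disney-film", "mubi", "mubi-film",
--                     "approfondimenti", "streaming"},
--     "In Sala": {"in-sala"},
--     "Cult Movies": {"cult-movie"},
--     "Animazione": {"animazione", "animazione/anime"},
--     "Approfondimento": {"approfondimento"},
--     "Festival di Cinema": {"festival-di-cinema"},
--     "Trailers": {"trailers"},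
--     "Serie TV": {"serie-tv", "netflix-serie-tv", "prime-video-serietv", "sky-serie-tv",
--                  "disney-serietv", "paramount-serie-tv", "appletv-serietv", "tim-vision-serie-tv"},
--     "Guide e Film da Vedere": {"film-da-vedere"},
--     "Speciali e Magazine": {"magazine-2", "taxidrivers-magazine"},
--     "Live Streaming On Demand": {"live-streaming-on-demand"},
--     "Rubriche": {"rubriche"},
--     "Interviste": {"interviews"}
-- }
--
-- def map_ga4_categories(path: str) -> str:
--     """
--     Mappa un percorso URL a una categoria di contenuto secondo parole chiave predefinite.
--
--     Args:
--         path (str): Il percorso URL da categorizzare. Esempio: "recensioni/netflix-film/in-sala"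
--
--     Returns:
--         str: Il nome della categoria mappata. Possibili valori includono:
--             - "News"
--             - "Recensioni"
--             - "Recensioni / In Sala"
--             - "In Sala"
--             - "Cult Movies"
--             - "Animazione"
--             - "Approfondimento"
--             - "Festival di Cinema"
--             - "Trailers"
--             - "Trailers / In Sala"
--             - "Serie TV"
--             - "Guide e Film da Vedere"
--             - "Speciali e Magazine"
--             - "Live Streaming On Demand"
--             - "Rubriche"
--             - "Interviste"
--             - "Anticipazioni" (prioritaria se presente nel path)
--             - "Altro" (default se nessuna corrispondenza)
--
--     Note:
--         - Se "anticipazioni" è presente nel path, viene restituita la categoria "Anticipazioni".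
--         - Se la categoria è "Recensioni" o "Trailers" e "in-sala" è nel path, restituisce rispettivamente "Recensioni / In Sala" o "Trailers / In Sala".
--         - La funzione analizza il path suddividendolo in sottoparti e controllando l'intersezione con i set di keyword definiti in CATEGORIES.
--     """
--     subpaths = path.split("/")
--
--     if not subpaths:
--         return "Altro"
--
--     for category, keywords in CATEGORIES.items():
--         for keyword in keywords:
--             if keyword in subpaths:
--                 # Special cases
--                 if "si-fara" in subpaths:
--                     return "Si farà"
--                 if "serie-tv" in subpaths:
--                     return "Serie TV"
--                 if "anticipazioni" in subpaths:
--                     return "Anticipazioni"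
--                 if category == "Recensioni" and "in-sala" in subpaths:
--                     return "Recensioni / In Sala"
--                 if category == "Trailers" and "in-sala" in subpaths:
--                     return "Trailers / In Sala"
--                 return category
--     return "Altro"
-- ===== SOURCE B (Python) =====
-- CATEGORIES = {
--     "News": {"latest-news", "focus-italia"},
--     "Recensioni": {"review", "netflix-film", "sky-film", "disney-film", "mubi", "mubi-film",
--                     "approfondimenti", "streaming"},
--     "In Sala": {"in-sala"},
--     "Cult Movies": {"cult-movie"},
--     "Animazione": {"animazione", "animazione/anime"},
--     "Approfondimento": {"approfondimento"},
--     "Festival di Cinema": {"festival-di-cinema"},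
--     "Trailers": {"trailers"},
--     "Serie TV": {"serie-tv", "netflix-serie-tv", "prime-video-serietv", "sky-serie-tv",
--                  "disney-serietv", "paramount-serie-tv", "appletv-serietv", "tim-vision-serie-tv"},
--     "Guide e Film da Vedere": {"film-da-vedere"},
--     "Speciali e Magazine": {"magazine-2", "taxidrivers-magazine"},
--     "Live Streaming On Demand": {"live-streaming-on-demand"},
--     "Rubriche": {"rubriche"},
--     "Interviste": {"interviews"}
-- }
--
-- # inverted index: keyword -> (rank of its category in CATEGORIES order, category)
-- _INDEX = {kw: (rank, cat)
--           for rank, (cat, kws) in enumerate(CATEGORIES.items())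
--           for kw in kws}
--
-- def map_ga4_categories(path: str) -> str:
--     subpaths = path.split("/")
--     best = None
--     for seg in subpaths:
--         hit = _INDEX.get(seg)
--         if hit is not None and (best is None or hit[0] < best[0]):
--             best = hit
--     if best is None:
--         return "Altro"
--     cat = best[1]
--     if "si-fara" in subpaths:
--         return "Si farà"
--     if "serie-tv" in subpaths:
--         return "Serie TV"
--     if "anticipazioni" in subpaths:
--         return "Anticipazioni"
--     if cat == "Recensioni" and "in-sala" in subpaths:
--         return "Recensioni / In Sala"
--     if cat == "Trailers" and "in-sala" in subpaths:
--         return "Trailers / In Sala"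
--     return cat
-- ===== Notes on version B (the rewrite author's own statement) =====
-- stated objective: alternative
-- what changed: Replaces A's category-major nested scan over CATEGORIES (membership test of each keyword in the path segments) with a precomputed inverted index keyword -> (rank, category) and a single pass over the path segments that keeps the minimum-rank hit, then applies the same override cascade.
import Mathlib
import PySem

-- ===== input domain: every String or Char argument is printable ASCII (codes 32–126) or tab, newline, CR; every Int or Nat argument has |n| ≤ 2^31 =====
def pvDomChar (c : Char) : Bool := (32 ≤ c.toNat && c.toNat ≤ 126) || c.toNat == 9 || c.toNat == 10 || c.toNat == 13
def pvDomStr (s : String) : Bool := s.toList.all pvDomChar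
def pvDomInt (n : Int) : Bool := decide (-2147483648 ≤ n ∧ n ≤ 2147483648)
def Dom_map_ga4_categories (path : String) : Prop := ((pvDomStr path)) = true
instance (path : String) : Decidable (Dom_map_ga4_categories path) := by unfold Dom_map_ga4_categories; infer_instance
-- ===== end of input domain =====

-- B replaces A's category-major nested scan by a precomputed inverted index keyword -> (rank, category)
-- and a single pass over the path segments keeping the minimum-rank hit (objective: alternative/idiomatic).

-- ===== PORT A =====
-- the module constant CATEGORIES (dict of sets -> association list of distinct-element lists)
def CATS : List (String × List String) :=
  [ ("News", ["latest-news", "focus-italia"]),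
    ("Recensioni", ["review", "netflix-film", "sky-film", "disney-film", "mubi", "mubi-film",
                    "approfondimenti", "streaming"]),
    ("In Sala", ["in-sala"]),
    ("Cult Movies", ["cult-movie"]),
    ("Animazione", ["animazione", "animazione/anime"]),
    ("Approfondimento", ["approfondimento"]),
    ("Festival di Cinema", ["festival-di-cinema"]),
    ("Trailers", ["trailers"]),
    ("Serie TV", ["serie-tv", "netflix-serie-tv", "prime-video-serietv", "sky-serie-tv",
                  "disney-serietv", "paramount-serie-tv", "appletv-serietv", "tim-vision-serie-tv"]),
    ("Guide e Film da Vedere", ["film-da-vedere"]),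
    ("Speciali e Magazine", ["magazine-2", "taxidrivers-magazine"]),
    ("Live Streaming On Demand", ["live-streaming-on-demand"]),
    ("Rubriche", ["rubriche"]),
    ("Interviste", ["interviews"]) ]

-- the special-case return block inside A's inner loop
def specialCasesA (category : String) (subpaths : List String) : String :=
  if subpaths.contains "si-fara" then "Si farà"
  else if subpaths.contains "serie-tv" then "Serie TV"
  else if subpaths.contains "anticipazioni" then "Anticipazioni"
  else if category == "Recensioni" && subpaths.contains "in-sala" then "Recensioni / In Sala"
  else if category == "Trailers" && subpaths.contains "in-sala" then "Trailers / In Sala"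
  else category

-- `for keyword in keywords: if keyword in subpaths: return …`
def innerA (category : String) (subpaths : List String) : List String → Option String
  | [] => none
  | keyword :: rest =>
      if subpaths.contains keyword then some (specialCasesA category subpaths)
      else innerA category subpaths rest

-- `for category, keywords in CATEGORIES.items(): …`
def outerA (subpaths : List String) : List (String × List String) → Option String
  | [] => none
  | (category, keywords) :: rest =>
      match innerA category subpaths keywords with
      | some r => some r
      | none => outerA subpaths rest

def map_ga4_categories (path : String) : String :=
  -- path.split("/"): sep is the nonempty literal "/", so split? is always `some`
  let subpaths := (PySem.Str.split? path "/").getD []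
  if subpaths = [] then "Altro"
  else
    match outerA subpaths CATS with
    | some r => r
    | none => "Altro"

-- ===== PORT B =====
-- _INDEX = {kw: (rank, cat) for rank, (cat, kws) in enumerate(CATEGORIES.items()) for kw in kws}
def bIndex : PySem.Dict String (Int × String) :=
  PySem.Dict.ofList
    (CATS.zipIdx.flatMap (fun p => p.1.2.map (fun kw => (kw, ((p.2 : Int), p.1.1)))))

-- loop body: keep the hit with the smallest rank seen so far
def bStep (best : Option (Int × String)) (seg : String) : Option (Int × String) :=
  match bIndex.get? seg with
  | none => best
  | some hit =>
      match best with
      | none => some hit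
      | some b => if hit.1 < b.1 then some hit else some b

-- the override cascade applied to the chosen category
def bOverrides (cat : String) (subpaths : List String) : String :=
  if subpaths.contains "si-fara" then "Si farà"
  else if subpaths.contains "serie-tv" then "Serie TV"
  else if subpaths.contains "anticipazioni" then "Anticipazioni"
  else if cat == "Recensioni" && subpaths.contains "in-sala" then "Recensioni / In Sala"
  else if cat == "Trailers" && subpaths.contains "in-sala" then "Trailers / In Sala"
  else cat

def map_ga4_categories_alt (path : String) : String :=
  let subpaths := (PySem.Str.split? path "/").getD []
  match subpaths.foldl bStep none with
  | none => "Altro"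
  | some best => bOverrides best.2 subpaths

-- ===== PRECONDITION & SPEC =====
def Spec_map_ga4_categories (path : String) (out : String) : Prop := out = map_ga4_categories_alt path
instance (path : String) (out : String) : Decidable (Spec_map_ga4_categories path out) := by unfold Spec_map_ga4_categories; infer_instance

-- ===== CLAIM (what is proved, stated in full; the proofs are below) =====
def Claim_equal_map_ga4_categories : Prop := ∀ (path : String), Dom_map_ga4_categories path → Spec_map_ga4_categories path (map_ga4_categories path)

-- ===== LEMMAS AND PROOFS =====

-- left-biased minimum-by-rank merge; bStep is `mrg` of the old best and the lookup
def mrg : Option (Int × String) → Option (Int × String) → Option (Int × String)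
  | b, none => b
  | none, some h => some h
  | some b, some h => if h.1 < b.1 then some h else some b

-- first-match lookup in the flattened (keyword, rank, category) list, ranks starting at n
def lk : List (String × List String) → Int → String → Option (Int × String)
  | [], _, _ => none
  | (c, ks) :: rest, n, seg =>
      if ks.contains seg then some (n, c) else lk rest (n + 1) seg

-- the flattened index list with ranks starting at n
def flatIdx : Int → List (String × List String) → List (String × Int × String)
  | _, [] => []
  | n, (c, ks) :: rest => ks.map (fun k => (k, (n, c))) ++ flatIdx (n + 1) rest

-- (rank, category) of the first category intersecting sp, ranks from n
def fm : List (String × List String) → Int → List String → Option (Int × String)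
  | [], _, _ => none
  | (c, ks) :: rest, n, sp =>
      if sp.any (fun s => ks.contains s) then some (n, c) else fm rest (n + 1) sp

-- structural form of B's fold
def Mg (f : String → Option (Int × String)) : List String → Option (Int × String)
  | [] => none
  | s :: sp => mrg (f s) (Mg f sp)

theorem mrg_none_right (b : Option (Int × String)) : mrg b none = b := by
  cases b <;> rfl

theorem mrg_none_left (b : Option (Int × String)) : mrg none b = b := by
  cases b <;> rfl

theorem bStep_eq_mrg (b : Option (Int × String)) (s : String) :
    bStep b s = mrg b (bIndex.get? s) := by
  cases h : bIndex.get? s <;> cases b <;> simp [bStep, mrg, h]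

theorem mrg_assoc (x y z : Option (Int × String)) :
    mrg (mrg x y) z = mrg x (mrg y z) := by
  rcases x with _ | ⟨a1, a2⟩ <;> rcases y with _ | ⟨b1, b2⟩ <;> rcases z with _ | ⟨c1, c2⟩ <;>
    simp only [mrg] <;> split_ifs <;> simp_all <;> intros <;>
    (first | rfl | omega | (split_ifs <;> simp_all <;> omega))

theorem foldl_bStep (sp : List String) : ∀ b, sp.foldl bStep b = mrg b (sp.foldl bStep none) := by
  induction sp with
  | nil => intro b; exact (mrg_none_right b).symm
  | cons s sp ih =>
      intro b
      simp only [List.foldl_cons]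
      rw [ih (bStep b s), ih (bStep none s), bStep_eq_mrg, bStep_eq_mrg, mrg_assoc,
        mrg_none_left]

theorem foldl_eq_Mg (sp : List String) :
    sp.foldl bStep none = Mg (fun s => bIndex.get? s) sp := by
  induction sp with
  | nil => rfl
  | cons s sp ih =>
      simp only [List.foldl_cons, Mg]
      rw [foldl_bStep, bStep_eq_mrg, ih, mrg_none_left]

theorem items_bIndex : bIndex.items = flatIdx 0 CATS := by decide

theorem find?_kwmap (seg : String) (n : Int) (c : String) : ∀ ks : List String,
    List.find? (fun p => p.1 == seg) (ks.map (fun k => (k, (n, c)))) =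
      if ks.contains seg then some (seg, (n, c)) else none := by
  intro ks
  induction ks with
  | nil => rfl
  | cons k ks ih =>
      simp only [List.map_cons, List.find?_cons, List.contains_cons]
      by_cases hk : k = seg
      · subst hk; simp
      · have hne : (k == seg) = false := by simp [hk]
        simp only [hne]
        rw [ih]
        by_cases hm : seg ∈ ks <;> simp [hm, Ne.symm hk]

theorem find?_flatIdx : ∀ (cats : List (String × List String)) (n : Int) (seg : String),
    (List.find? (fun p => p.1 == seg) (flatIdx n cats)).map (·.2) = lk cats n seg := by
  intro cats
  induction cats with
  | nil => intro n seg; rfl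
  | cons p rest ih =>
      intro n seg
      obtain ⟨c, ks⟩ := p
      simp only [flatIdx, lk, List.find?_append, find?_kwmap]
      by_cases h : seg ∈ ks
      · simp [h, Option.some_or]
      · simp [h, ih]

theorem get?_bIndex (seg : String) : bIndex.get? seg = lk CATS 0 seg := by
  show Option.map (fun x => x.2) (List.find? (fun p => p.1 == seg) bIndex.items) = _
  rw [items_bIndex]
  exact find?_flatIdx CATS 0 seg

theorem lk_rank : ∀ (cats : List (String × List String)) (n : Int) (seg : String) (r : Int) (c : String),
    lk cats n seg = some (r, c) → n ≤ r := by
  intro cats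
  induction cats with
  | nil => intro n seg r c h; simp [lk] at h
  | cons p rest ih =>
      intro n seg r c h
      obtain ⟨c', ks⟩ := p
      simp only [lk] at h
      split at h
      · simp at h; omega
      · have := ih (n + 1) seg r c h; omega

theorem Mg_rank : ∀ (sp : List String) (cats : List (String × List String)) (n : Int) (r : Int) (c : String),
    Mg (lk cats n) sp = some (r, c) → n ≤ r := by
  intro sp
  induction sp with
  | nil => intro cats n r c h; simp [Mg] at h
  | cons s sp ih =>
      intro cats n r c h
      simp only [Mg] at h
      cases h1 : lk cats n s with
      | none =>
          rw [h1, mrg_none_left] at h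
          exact ih cats n r c h
      | some p1 =>
          obtain ⟨r1, c1⟩ := p1
          have hr1 := lk_rank cats n s r1 c1 h1
          rw [h1] at h
          cases h2 : Mg (lk cats n) sp with
          | none => rw [h2, mrg_none_right] at h; simp at h; omega
          | some p2 =>
              obtain ⟨r2, c2⟩ := p2
              have hr2 := ih cats n r2 c2 h2
              rw [h2] at h
              simp only [mrg] at h
              split at h <;> simp at h <;> omega

theorem Mg_lk : ∀ (cats : List (String × List String)) (n : Int) (sp : List String),
    Mg (lk cats n) sp = fm cats n sp := by
  intro cats
  induction cats with
  | nil =>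
      intro n sp
      induction sp with
      | nil => rfl
      | cons s sp ih => simpa [Mg, lk, fm, mrg_none_left] using ih
  | cons p rest ih =>
      intro n sp
      obtain ⟨c, ks⟩ := p
      have key : ∀ sp', Mg (lk ((c, ks) :: rest) n) sp' =
          if sp'.any (fun s => ks.contains s) then some (n, c) else Mg (lk rest (n + 1)) sp' := by
        intro sp'
        induction sp' with
        | nil => rfl
        | cons s sp' ih' =>
            simp only [Mg, List.any_cons]
            by_cases hs : ks.contains s = true
            · have hlk : lk ((c, ks) :: rest) n s = some (n, c) := by
                show (if ks.contains s = true then some (n, c) else lk rest (n + 1) s) = some (n, c)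
                rw [if_pos hs]
              rw [hlk, ih', hs, Bool.true_or, if_pos rfl]
              by_cases ht : sp'.any (fun s => ks.contains s) = true
              · rw [if_pos ht]
                simp [mrg]
              · rw [if_neg ht]
                cases h2 : Mg (lk rest (n + 1)) sp' with
                | none => rw [mrg_none_right]
                | some p2 =>
                    obtain ⟨r2, c2⟩ := p2
                    have := Mg_rank sp' rest (n + 1) r2 c2 h2
                    simp only [mrg]
                    split <;> first | omega | rfl
            · have hlk : lk ((c, ks) :: rest) n s = lk rest (n + 1) s := by
                show (if ks.contains s = true then some (n, c) else lk rest (n + 1) s) = lk rest (n + 1) s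
                rw [if_neg hs]
              rw [hlk, ih']
              have hs' : ks.contains s = false := by simpa using hs
              rw [hs', Bool.false_or]
              by_cases ht : sp'.any (fun s => ks.contains s) = true
              · rw [if_pos ht, if_pos ht]
                cases h1 : lk rest (n + 1) s with
                | none => rw [mrg_none_left]
                | some p1 =>
                    obtain ⟨r1, c1⟩ := p1
                    have := lk_rank rest (n + 1) s r1 c1 h1
                    simp only [mrg]
                    split <;> first | rfl | omega
              · rw [if_neg ht, if_neg ht]
      rw [key sp]
      simp only [fm]
      by_cases ht : sp.any (fun s => ks.contains s) = true
      · rw [if_pos ht, if_pos ht]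
      · rw [if_neg ht, if_neg ht, ih (n + 1) sp]

theorem any_contains_comm (xs ys : List String) :
    xs.any (fun a => ys.contains a) = ys.any (fun b => xs.contains b) := by
  rw [Bool.eq_iff_iff]
  simp only [List.any_eq_true, List.contains_iff_mem]
  exact ⟨fun ⟨a, h1, h2⟩ => ⟨a, h2, h1⟩, fun ⟨a, h1, h2⟩ => ⟨a, h2, h1⟩⟩

theorem fm_find : ∀ (cats : List (String × List String)) (n : Int) (sp : List String),
    (fm cats n sp).map (·.2) = (cats.find? (fun p => p.2.any (fun k => sp.contains k))).map (·.1) := by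
  intro cats
  induction cats with
  | nil => intro n sp; rfl
  | cons p rest ih =>
      intro n sp
      obtain ⟨c, ks⟩ := p
      rw [show fm ((c, ks) :: rest) n sp =
            (if sp.any (fun s => ks.contains s) then some (n, c) else fm rest (n + 1) sp) from rfl,
          any_contains_comm sp ks]
      by_cases h : (ks.any fun k => sp.contains k) = true
      · rw [if_pos h, List.find?_cons_of_pos (by exact h)]
        rfl
      · rw [if_neg h,
            List.find?_cons_of_neg (p := fun p => p.2.any fun k => sp.contains k)
              (a := (c, ks)) (l := rest) (by exact h)]
        exact ih (n + 1) sp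

theorem innerA_eq (c : String) (sp : List String) : ∀ ks,
    innerA c sp ks = if ks.any (fun k => sp.contains k) then some (specialCasesA c sp) else none := by
  intro ks
  induction ks with
  | nil => rfl
  | cons k ks ih =>
      simp only [innerA, List.any_cons, ih]
      by_cases h : k ∈ sp <;> simp [h]

theorem outerA_eq (sp : List String) : ∀ cats,
    outerA sp cats = (cats.find? (fun p => p.2.any (fun k => sp.contains k))).map
      (fun p => specialCasesA p.1 sp) := by
  intro cats
  induction cats with
  | nil => rfl
  | cons p rest ih =>
      obtain ⟨c, ks⟩ := p
      show (match innerA c sp ks with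
            | some r => some r
            | none => outerA sp rest) = _
      rw [innerA_eq]
      by_cases h : (ks.any fun k => sp.contains k) = true
      · rw [if_pos h, List.find?_cons_of_pos (by exact h)]
        rfl
      · rw [if_neg h,
            List.find?_cons_of_neg (p := fun p => p.2.any fun k => sp.contains k)
              (a := (c, ks)) (l := rest) (by exact h), ih]

theorem specialCasesA_eq_bOverrides (c : String) (sp : List String) :
    specialCasesA c sp = bOverrides c sp := rfl

theorem core (sp : List String) :
    (if sp = [] then "Altro"
     else match outerA sp CATS with
          | some r => r
          | none => "Altro") =
    (match sp.foldl bStep none with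
     | none => "Altro"
     | some best => bOverrides best.2 sp) := by
  by_cases hsp : sp = []
  · subst hsp; rfl
  · rw [if_neg hsp, foldl_eq_Mg]
    have hf : (fun s => bIndex.get? s) = lk CATS 0 := funext (fun s => get?_bIndex s)
    rw [hf, Mg_lk, outerA_eq]
    have hfm := fm_find CATS 0 sp
    cases h : fm CATS 0 sp with
    | none =>
        rw [h] at hfm
        have : CATS.find? (fun p => p.2.any (fun k => sp.contains k)) = none := by
          cases hfind : CATS.find? (fun p => p.2.any (fun k => sp.contains k)) with
          | none => rfl
          | some q => rw [hfind] at hfm; simp at hfm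
        rw [this]
        rfl
    | some best =>
        rw [h] at hfm
        cases hfind : CATS.find? (fun p => p.2.any (fun k => sp.contains k)) with
        | none => rw [hfind] at hfm; simp at hfm
        | some q =>
            rw [hfind] at hfm
            simp only [Option.map_some, Option.some.injEq] at hfm
            simp [hfm, specialCasesA_eq_bOverrides]

-- ===== VERDICT (by name: the statement is the Claim_ definition above) =====
theorem map_ga4_categories_spec : Claim_equal_map_ga4_categories := by
  intro path _
  unfold Spec_map_ga4_categories map_ga4_categories map_ga4_categories_alt
  exact core ((PySem.Str.split? path "/").getD [])
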